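-- pv_equiv track=rewrite | github.com/luvendtti10/Lucasvenditti_pgy1121_002_D | Funciones.py | ComprobarAsiento
-- ===== SOURCE A (Python) =====
-- def ComprobarAsiento(arreglo, num_asiento):
--     x = 0
--     for f in range(10):
--         for c in range(10):
--             x = x + 1
--             if str(x) == str(num_asiento):
--                 if arreglo[f][c] == 'X':
--                     return False
--     return True
-- ===== SOURCE B (Python) =====
-- def ComprobarAsiento(arreglo, num_asiento):
--     # Direct index arithmetic instead of scanning the 10x10 grid.
--     if 1 <= num_asiento <= 100:
--         f, c = divmod(num_asiento - 1, 10)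
--         return arreglo[f][c] != 'X'
--     return True
-- ===== Notes on version B (the rewrite author's own statement) =====
-- stated objective: simpler
-- what changed: Replaces the fixed 10x10 nested scan with string comparisons at every seat by a range check plus divmod computing the row/column directly.
import Mathlib
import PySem

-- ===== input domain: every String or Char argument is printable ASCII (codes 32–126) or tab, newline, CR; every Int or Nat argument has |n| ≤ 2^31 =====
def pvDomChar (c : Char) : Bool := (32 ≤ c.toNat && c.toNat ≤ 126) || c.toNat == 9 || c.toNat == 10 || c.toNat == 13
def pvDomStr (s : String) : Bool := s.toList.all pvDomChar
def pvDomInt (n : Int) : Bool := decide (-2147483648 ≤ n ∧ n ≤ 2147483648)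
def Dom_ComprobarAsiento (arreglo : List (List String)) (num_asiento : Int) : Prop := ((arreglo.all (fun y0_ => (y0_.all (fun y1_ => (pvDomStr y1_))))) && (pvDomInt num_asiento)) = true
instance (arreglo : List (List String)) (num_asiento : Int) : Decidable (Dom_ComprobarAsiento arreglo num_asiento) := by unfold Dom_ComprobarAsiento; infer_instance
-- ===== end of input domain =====

-- B replaces A's fixed 10x10 scan (with str() comparison at every seat) by a range
-- check plus divmod computing the row/column directly; objective: simpler.

-- ===== PORT A =====
-- inner 'for c in range(10)' loop; returns the updated x and 'some false' on an early return
def caCols (arreglo : List (List String)) (num_asiento : Int) (f : Int) :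
    List Int → Int → Int × Option Bool
  | [], x => (x, none)
  | c :: rest, x =>
    let x1 := x + 1
    if PySem.Int.toStr x1 = PySem.Int.toStr num_asiento then
      -- arreglo[f][c]; Python raises IndexError when out of range (excluded by Pre_)
      if (PySem.List.pyGet? arreglo f).bind (fun row => PySem.List.pyGet? row c) = some "X" then
        (x1, some false)
      else caCols arreglo num_asiento f rest x1
    else caCols arreglo num_asiento f rest x1

-- outer 'for f in range(10)' loop
def caRows (arreglo : List (List String)) (num_asiento : Int) :
    List Int → Int → Bool
  | [], _ => true
  | f :: rest, x =>
    match caCols arreglo num_asiento f (PySem.List.pyRange 0 10 1) x with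
    | (x', none) => caRows arreglo num_asiento rest x'
    | (_, some b) => b

def ComprobarAsiento (arreglo : List (List String)) (num_asiento : Int) : Bool :=
  caRows arreglo num_asiento (PySem.List.pyRange 0 10 1) 0

-- ===== PORT B =====
def ComprobarAsiento_alt (arreglo : List (List String)) (num_asiento : Int) : Bool :=
  if 1 ≤ num_asiento ∧ num_asiento ≤ 100 then
    -- f, c = divmod(num_asiento - 1, 10); arreglo[f][c] raises IndexError when out of range (excluded by Pre_)
    match (PySem.List.pyGet? arreglo (PySem.Int.floordiv (num_asiento - 1) 10)).bind
        (fun row => PySem.List.pyGet? row (PySem.Int.mod (num_asiento - 1) 10)) with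
    | some s => decide (s ≠ "X")
    | none => true
  else true

-- ===== PRECONDITION & SPEC =====
-- Pre_ excludes exactly the inputs where Python A (and B alike) raises IndexError:
-- a seat number 1..100 whose row/column does not exist in arreglo.
def Pre_ComprobarAsiento (arreglo : List (List String)) (num_asiento : Int) : Prop :=
  1 ≤ num_asiento → num_asiento ≤ 100 →
    (((num_asiento - 1) / 10).toNat < arreglo.length ∧
     ((num_asiento - 1) % 10).toNat < (arreglo.getD ((num_asiento - 1) / 10).toNat []).length)
instance (arreglo : List (List String)) (num_asiento : Int) : Decidable (Pre_ComprobarAsiento arreglo num_asiento) := by unfold Pre_ComprobarAsiento; infer_instance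

def pvWitness_ComprobarAsiento : List (List String) × Int := ([["O"]], 1)

def Spec_ComprobarAsiento (arreglo : List (List String)) (num_asiento : Int) (out : Bool) : Prop := out = ComprobarAsiento_alt arreglo num_asiento
instance (arreglo : List (List String)) (num_asiento : Int) (out : Bool) : Decidable (Spec_ComprobarAsiento arreglo num_asiento out) := by unfold Spec_ComprobarAsiento; infer_instance

-- ===== CLAIM (what is proved, stated in full; the proofs are below) =====
def Claim_equal_ComprobarAsiento : Prop := ∀ (arreglo : List (List String)) (num_asiento : Int), Dom_ComprobarAsiento arreglo num_asiento → Pre_ComprobarAsiento arreglo num_asiento → Spec_ComprobarAsiento arreglo num_asiento (ComprobarAsiento arreglo num_asiento)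

-- ===== LEMMAS AND PROOFS =====

-- str(n) is injective on ints: first over Nat digits, then over Int.
def pvDigits (n : Nat) : List Char :=
  if _h : n < 10 then [Nat.digitChar n]
  else pvDigits (n / 10) ++ [Nat.digitChar (n % 10)]
decreasing_by exact Nat.div_lt_self (by omega) (by omega)

theorem pvDigits_ne_nil (n : Nat) : pvDigits n ≠ [] := by
  rw [pvDigits]; split_ifs <;> simp

theorem pvDigits_decomp (n : Nat) :
    pvDigits n = (if n < 10 then [] else pvDigits (n / 10)) ++ [Nat.digitChar (n % 10)] := by
  rw [pvDigits]; split_ifs with h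
  · simp [Nat.mod_eq_of_lt h]
  · simp

theorem digitChar_inj (a b : Nat) (ha : a < 10) (hb : b < 10)
    (h : Nat.digitChar a = Nat.digitChar b) : a = b := by
  interval_cases a <;> interval_cases b <;> simp_all [Nat.digitChar]

theorem pvDigits_head (n : Nat) : ∃ d, d < 10 ∧ (pvDigits n).head? = some (Nat.digitChar d) := by
  induction n using Nat.strong_induction_on with
  | _ n ih =>
    rw [pvDigits]; split_ifs with h
    · exact ⟨n, h, rfl⟩
    · obtain ⟨d, hd, hhd⟩ := ih (n / 10) (Nat.div_lt_self (by omega) (by omega))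
      exact ⟨d, hd, by rw [List.head?_append_of_ne_nil _ (pvDigits_ne_nil _)]; exact hhd⟩

theorem pvDigits_inj (a b : Nat) (h : pvDigits a = pvDigits b) : a = b := by
  induction a using Nat.strong_induction_on generalizing b with
  | _ a ih =>
    rw [pvDigits_decomp a, pvDigits_decomp b] at h
    obtain ⟨h1, h2⟩ := List.append_inj' h (by simp)
    have hmod : a % 10 = b % 10 :=
      digitChar_inj _ _ (Nat.mod_lt _ (by omega)) (Nat.mod_lt _ (by omega)) (by simpa using h2)
    by_cases ha : a < 10 <;> by_cases hb : b < 10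
    · omega
    · simp [ha, hb] at h1
      exact absurd h1 (pvDigits_ne_nil _)
    · simp [ha, hb] at h1
      exact absurd h1 (pvDigits_ne_nil _)
    · simp [ha, hb] at h1
      have := ih (a / 10) (Nat.div_lt_self (by omega) (by omega)) (b / 10) h1
      omega

theorem toDigitsCore_eq_pvDigits (f : Nat) : ∀ (n : Nat) (acc : List Char), n < f →
    Nat.toDigitsCore 10 f n acc = pvDigits n ++ acc := by
  induction f with
  | zero => omega
  | succ f ih =>
    intro n acc hn
    rw [Nat.toDigitsCore]
    by_cases h : n / 10 = 0
    · rw [if_pos h, pvDigits]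
      have : n < 10 := by omega
      simp [this, Nat.mod_eq_of_lt this]
    · rw [if_neg h, ih (n / 10) _ (by omega)]
      rw [pvDigits_decomp n, if_neg (by omega)]
      simp

theorem toDigits_inj (a b : Nat) (h : Nat.toDigits 10 a = Nat.toDigits 10 b) : a = b := by
  unfold Nat.toDigits at h
  rw [toDigitsCore_eq_pvDigits _ _ _ (by omega), toDigitsCore_eq_pvDigits _ _ _ (by omega)] at h
  simp at h
  exact pvDigits_inj _ _ h

theorem toChars_inj (a b : Int) (h : PySem.Int.toChars a = PySem.Int.toChars b) : a = b := by
  unfold PySem.Int.toChars at h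
  have hdash : ∀ n : Nat, (pvDigits n).head? ≠ some '-' := by
    intro n hc
    obtain ⟨d, hd, hhd⟩ := pvDigits_head n
    rw [hhd] at hc
    interval_cases d <;> simp_all [Nat.digitChar]
  have htd : ∀ n : Nat, Nat.toDigits 10 n = pvDigits n := by
    intro n
    unfold Nat.toDigits
    rw [toDigitsCore_eq_pvDigits _ _ _ (by omega)]; simp
  split_ifs at h with h1 h2 h2
  · have := toDigits_inj _ _ (List.cons.injEq .. ▸ h).2
    omega
  · exfalso
    rw [htd b.toNat] at h
    have : (pvDigits b.toNat).head? = some '-' := by rw [← h]; rfl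
    exact hdash _ this
  · exfalso
    rw [htd a.toNat] at h
    have : (pvDigits a.toNat).head? = some '-' := by rw [h]; rfl
    exact hdash _ this
  · have := toDigits_inj _ _ h
    omega

theorem toStr_eq_iff (a b : Int) : PySem.Int.toStr a = PySem.Int.toStr b ↔ a = b := by
  constructor
  · intro h
    have := congrArg String.toList h
    rw [PySem.Int.toList_toStr, PySem.Int.toList_toStr] at this
    exact toChars_inj _ _ this
  · rintro rfl; rfl

-- the seat-lookup expression both ports share
def pvLook (arreglo : List (List String)) (f c : Int) : Option String :=
  (PySem.List.pyGet? arreglo f).bind (fun row => PySem.List.pyGet? row c)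

-- closed form of the inner loop
theorem caCols_eq (arreglo : List (List String)) (n f : Int) (cs : List Int) (x : Int) :
    caCols arreglo n f cs x =
      if (x < n ∧ n ≤ x + cs.length) ∧
          pvLook arreglo f (cs.getD (n - x - 1).toNat 0) = some "X"
      then (n, some false)
      else (x + cs.length, none) := by
  induction cs generalizing x with
  | nil => simp [caCols]
  | cons c rest ih =>
    rw [caCols]
    simp only [toStr_eq_iff]
    rw [show (((c :: rest).length : Nat) : Int) = ((rest.length : Nat) : Int) + 1 from by
      push_cast [List.length_cons]; ring]
    by_cases hx : x + 1 = n
    · rw [if_pos hx]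
      have h0 : (n - x - 1).toNat = 0 := by omega
      by_cases hX : pvLook arreglo f c = some "X"
      · rw [if_pos (show (PySem.List.pyGet? arreglo f).bind (fun row => PySem.List.pyGet? row c) = some "X" from hX)]
        rw [if_pos ⟨⟨by omega, by omega⟩, by simpa [h0] using hX⟩]
        simp [hx]
      · rw [if_neg (show ¬ (PySem.List.pyGet? arreglo f).bind (fun row => PySem.List.pyGet? row c) = some "X" from hX)]
        rw [ih, if_neg (by rintro ⟨⟨h1, -⟩, -⟩; omega),
          if_neg (by rintro ⟨-, hL⟩; exact hX (by simpa [h0] using hL))]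
        exact Prod.ext (by ring) rfl
    · rw [if_neg hx, ih]
      by_cases hr : x + 1 < n ∧ n ≤ x + 1 + rest.length
      · have hidx : (n - x - 1).toNat = (n - (x + 1) - 1).toNat + 1 := by omega
        have hgd : (c :: rest).getD (n - x - 1).toNat 0 = rest.getD (n - (x + 1) - 1).toNat 0 := by
          rw [hidx]; rfl
        by_cases hL : pvLook arreglo f (rest.getD (n - (x + 1) - 1).toNat 0) = some "X"
        · rw [if_pos ⟨hr, hL⟩, if_pos ⟨⟨by omega, by omega⟩, by rw [hgd]; exact hL⟩]
        · rw [if_neg (by rintro ⟨-, hL'⟩; exact hL hL'),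
            if_neg (by rintro ⟨-, hL'⟩; rw [hgd] at hL'; exact hL hL')]
          exact Prod.ext (by ring) rfl
      · rw [if_neg (by rintro ⟨h1, -⟩; exact hr ⟨by omega, by omega⟩),
          if_neg (by rintro ⟨h1, -⟩; omega)]
        exact Prod.ext (by ring) rfl

-- closed form of the outer loop, descending over the remaining rows
theorem caRows_eq (arreglo : List (List String)) (n : Int) (k : Nat) (hk : k ≤ 10) :
    caRows arreglo n (PySem.List.pyRange k 10 1) (10 * k) =
      if (10 * (k : Int) < n ∧ n ≤ 100) ∧
          pvLook arreglo ((n - 1) / 10) ((n - 1) % 10) = some "X"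
      then false else true := by
  induction hn : 10 - k generalizing k with
  | zero =>
    have hk10 : k = 10 := by omega
    subst hk10
    rw [show PySem.List.pyRange ((10 : Nat) : Int) 10 1 = [] from by decide]
    rw [caRows, if_neg (by rintro ⟨⟨h1, h2⟩, -⟩; push_cast at h1; omega)]
  | succ m ih =>
    have hcons : PySem.List.pyRange (k : Int) 10 1 = (k : Int) :: PySem.List.pyRange ((k : Int) + 1) 10 1 :=
      PySem.List.pyRange_one_cons (by omega)
    rw [hcons, caRows, caCols_eq]
    rw [show ((PySem.List.pyRange 0 10 1).length : Int) = 10 from by decide]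
    by_cases hdec : 10 * (k : Int) < n ∧ n ≤ 10 * (k : Int) + 10
    · have hfd : (n - 1) / 10 = (k : Int) := by omega
      have hmd : (n - 1) % 10 = n - 10 * (k : Int) - 1 := by omega
      have hgd : (PySem.List.pyRange 0 10 1).getD (n - 10 * (k : Int) - 1).toNat 0 = n - 10 * (k : Int) - 1 := by
        rw [show PySem.List.pyRange 0 10 1 = [0,1,2,3,4,5,6,7,8,9] from by decide]
        have h9 : (n - 10 * (k : Int) - 1).toNat ≤ 9 := by omega
        interval_cases h : (n - 10 * (k : Int) - 1).toNat <;> simp_all <;> omega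
      by_cases hL : pvLook arreglo (k : Int) (n - 10 * (k : Int) - 1) = some "X"
      · rw [if_pos ⟨⟨by omega, by omega⟩, by rw [hgd]; exact hL⟩]
        dsimp only
        rw [if_pos ⟨⟨by omega, by omega⟩, by rw [hfd, hmd]; exact hL⟩]
      · rw [if_neg (by rintro ⟨-, hL'⟩; rw [hgd] at hL'; exact hL hL')]
        dsimp only
        have h10 : (10 * (k : Int) + 10) = 10 * ((k + 1 : Nat) : Int) := by push_cast; ring
        rw [h10, show ((k : Int) + 1) = ((k + 1 : Nat) : Int) from by push_cast; ring,
          ih (k + 1) (by omega) (by omega)]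
        rw [if_neg (by rintro ⟨⟨h1, -⟩, -⟩; push_cast at h1; omega),
          if_neg (by rintro ⟨-, hL'⟩; rw [hfd, hmd] at hL'; exact hL hL')]
    · rw [if_neg (by rintro ⟨⟨h1, h2⟩, -⟩; exact hdec ⟨h1, h2⟩)]
      dsimp only
      have h10 : (10 * (k : Int) + 10) = 10 * ((k + 1 : Nat) : Int) := by push_cast; ring
      rw [h10, show ((k : Int) + 1) = ((k + 1 : Nat) : Int) from by push_cast; ring,
        ih (k + 1) (by omega) (by omega)]
      by_cases hn100 : 10 * (k : Int) < n ∧ n ≤ 100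
      · have h1 : 10 * ((k + 1 : Nat) : Int) < n := by push_cast; omega
        by_cases hL : pvLook arreglo ((n - 1) / 10) ((n - 1) % 10) = some "X"
        · rw [if_pos ⟨⟨h1, hn100.2⟩, hL⟩, if_pos ⟨hn100, hL⟩]
        · rw [if_neg (by rintro ⟨-, hL'⟩; exact hL hL'), if_neg (by rintro ⟨-, hL'⟩; exact hL hL')]
      · rw [if_neg (by rintro ⟨⟨h1, h2⟩, -⟩; push_cast at h1; exact hn100 ⟨by omega, h2⟩),
          if_neg (by rintro ⟨h1, -⟩; exact hn100 h1)]

-- ===== VERDICT (by name: the statement is the Claim_ definition above) =====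
theorem ComprobarAsiento_spec : Claim_equal_ComprobarAsiento := by
  intro arreglo n _ hpre
  unfold Spec_ComprobarAsiento ComprobarAsiento ComprobarAsiento_alt
  rw [show (PySem.List.pyRange 0 10 1) = PySem.List.pyRange (0 : Nat) 10 1 from by norm_num,
    show (0 : Int) = 10 * ((0 : Nat) : Int) from by norm_num,
    caRows_eq arreglo n 0 (by omega)]
  by_cases hn : 1 ≤ n ∧ n ≤ 100
  · rw [if_pos hn]
    have hfd : PySem.Int.floordiv (n - 1) 10 = (n - 1) / 10 :=
      PySem.Int.floordiv_eq_ediv_of_pos (by omega)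
    have hmd : PySem.Int.mod (n - 1) 10 = (n - 1) % 10 :=
      PySem.Int.mod_eq_emod_of_pos (by omega)
    have hsome : (pvLook arreglo ((n - 1) / 10) ((n - 1) % 10)).isSome := by
      obtain ⟨h1, h2⟩ := hpre hn.1 hn.2
      unfold pvLook
      rw [PySem.List.pyGet?_of_nonneg arreglo (show (0 : Int) ≤ (n - 1) / 10 by omega),
        List.getElem?_eq_getElem (by omega)]
      simp only [Option.bind_some]
      rw [PySem.List.pyGet?_of_nonneg _ (show (0 : Int) ≤ (n - 1) % 10 by omega),
        List.getElem?_eq_getElem (by rwa [List.getD_eq_getElem _ _ (by omega)] at h2)]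
      rfl
    obtain ⟨s, hs⟩ := Option.isSome_iff_exists.mp hsome
    rw [hfd, hmd, show ((PySem.List.pyGet? arreglo ((n - 1) / 10)).bind
      (fun row => PySem.List.pyGet? row ((n - 1) % 10))) = pvLook arreglo ((n - 1) / 10) ((n - 1) % 10) from rfl, hs]
    by_cases hX : s = "X"
    · subst hX
      rw [if_pos ⟨⟨by omega, hn.2⟩, rfl⟩]
      simp
    · rw [if_neg (by rintro ⟨-, hL⟩; exact hX (by simpa using hL))]
      simp [hX]
  · rw [if_neg (by rintro ⟨⟨h1, h2⟩, -⟩; exact hn ⟨by omega, h2⟩),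
      if_neg hn]
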